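-- pv_equiv track=rewrite | github.com/josh-hsiehh/codesignal | diagonal.py | solution
-- ===== SOURCE A (Python) =====
-- def solution(matrix):
--     if not matrix:
--         return 0
--     rows, cols = len(matrix), len(matrix[0])
--     max_length = 0
--
--     # Possible diagonal directions: ↘, ↙, ↖, ↗
--     directions = [(1,1), (1,-1), (-1,1), (-1,-1)]
--
--     def get_pattern_value(step):
--         """ Returns expected value at a given step in the pattern. """
--         return 1 if step == 0 else (2 if step % 2 == 1 else 0)
--
--     def check_diagonal(r, c, dr, dc):
--         """ Checks the longest valid diagonal sequence from (r, c) in direction (dr, dc). """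
--         length = 0
--         x, y = r, c
--         step = 0  # Tracks position in the repeating pattern
--
--         while 0 <= x < rows and 0 <= y < cols and matrix[x][y] == get_pattern_value(step):
--             length += 1
--             x += dr
--             y += dc
--             step += 1
--
--         # Check if the sequence terminated at the border
--         if not (0 <= x < rows and 0 <= y < cols):
--             return length  # Valid sequence reaching the border
--         return 0  # Invalid sequence (did not reach the border)
--
--     for r in range(rows):
--         for c in range(cols):
--             if matrix[r][c] == 1:  # Start only from 1
--                 for dr, dc in directions:
--                     max_length = max(max_length, check_diagonal(r, c, dr, dc))
--
--     return max_length
-- ===== SOURCE B (Python) =====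
-- def solution(matrix):
--     if not matrix:
--         return 0
--     rows, cols = len(matrix), len(matrix[0])
--
--     def build(dr, dc):
--         # ok2[(r,c)]: values along (dr,dc) from (r,c) to the border alternate 2,0,2,0,...
--         # ok0:       same, starting with 0.  Filled border-inward so the next cell is ready.
--         ok2, ok0 = {}, {}
--         rs = range(rows - 1, -1, -1) if dr == 1 else range(rows)
--         cs = range(cols - 1, -1, -1) if dc == 1 else range(cols)
--         for r in rs:
--             for c in cs:
--                 v = matrix[r][c]
--                 nxt = (r + dr, c + dc)
--                 ok2[(r, c)] = v == 2 and ok0.get(nxt, True)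
--                 ok0[(r, c)] = v == 0 and ok2.get(nxt, True)
--         return ok2
--
--     tables = [(dr, dc, build(dr, dc)) for dr, dc in ((1, 1), (1, -1), (-1, 1), (-1, -1))]
--     best = 0
--     for r in range(rows):
--         for c in range(cols):
--             if matrix[r][c] != 1:
--                 continue
--             for dr, dc, ok2 in tables:
--                 if ok2.get((r + dr, c + dc), True):
--                     t = min(rows - r if dr == 1 else r + 1,
--                             cols - c if dc == 1 else c + 1)
--                     if t > best:
--                         best = t
--     return best
-- ===== Notes on version B (the rewrite author's own statement) =====
-- stated objective: alternative
-- what changed: B replaces A's per-start-cell diagonal walks by four border-inward dynamic-programming tables (one sweep per direction computing, for every cell, whether the ray to the border alternates 2,0,2,0,...), then a single scan over the 1-cells reads the answer from the tables in O(1) per (cell,direction).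
import Mathlib
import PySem

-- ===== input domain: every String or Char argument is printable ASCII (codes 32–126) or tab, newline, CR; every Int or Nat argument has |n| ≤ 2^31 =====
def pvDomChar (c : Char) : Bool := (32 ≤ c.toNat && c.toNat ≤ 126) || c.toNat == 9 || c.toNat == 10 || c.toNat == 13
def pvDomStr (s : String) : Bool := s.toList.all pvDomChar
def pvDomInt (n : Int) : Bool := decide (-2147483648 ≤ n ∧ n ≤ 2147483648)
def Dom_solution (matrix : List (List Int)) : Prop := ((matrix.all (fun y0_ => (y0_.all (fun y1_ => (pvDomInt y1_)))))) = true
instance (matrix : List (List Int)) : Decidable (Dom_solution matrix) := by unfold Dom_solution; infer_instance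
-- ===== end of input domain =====

-- B replaces A's per-start-cell diagonal walks by four border-inward DP tables (one sweep
-- per direction) plus a single scan of the 1-cells; alternative algorithm, same results.
-- ===== PORT A =====

-- matrix[x][y]; exact under Pre_solution: both programs only index with 0 ≤ x < len(matrix), 0 ≤ y < cols ≤ len(row)
def cellAt (m : List (List Int)) (x y : Int) : Int :=
  ((PySem.List.pyGet? m x).bind (fun row => PySem.List.pyGet? row y)).getD 0

def getPatternA (step : Int) : Int :=
  if step = 0 then 1 else if PySem.Int.mod step 2 = 1 then 2 else 0

def directionsA : List (Int × Int) := [(1, 1), (1, -1), (-1, 1), (-1, -1)]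

-- the while loop of check_diagonal; fuel only makes the recursion total (rows+cols+1 steps always suffice)
def walkA (m : List (List Int)) (rows cols dr dc : Int) : Nat → Int → Int → Int → Int → Int
  | 0, _, _, _, len => len
  | fuel + 1, x, y, step, len =>
    if 0 ≤ x ∧ x < rows ∧ 0 ≤ y ∧ y < cols then
      if cellAt m x y = getPatternA step then
        walkA m rows cols dr dc fuel (x + dr) (y + dc) (step + 1) (len + 1)
      else 0
    else len

def checkDiagonal (m : List (List Int)) (rows cols r c dr dc : Int) : Int :=
  walkA m rows cols dr dc (rows.toNat + cols.toNat + 1) r c 0 0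

def solution (matrix : List (List Int)) : Int :=
  match matrix with
  | [] => 0
  | row0 :: _ =>
    let rows : Int := (matrix.length : Int)
    let cols : Int := (row0.length : Int)
    (PySem.List.pyRange 0 rows 1).foldl (fun best r =>
      (PySem.List.pyRange 0 cols 1).foldl (fun best c =>
        if cellAt matrix r c = 1 then
          directionsA.foldl (fun best dir =>
            max best (checkDiagonal matrix rows cols r c dir.1 dir.2)) best
        else best) best) 0

-- ===== PORT B =====

-- closed-form length of the ray from (r, c) to the border in direction (dr, dc)
def rayLen (rows cols dr dc r c : Int) : Int :=
  min (if dr = 1 then rows - r else r + 1) (if dc = 1 then cols - c else c + 1)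

-- body of B's DP sweep: record for cell (r, c) whether the ray starting one step
-- further matches, extended by this cell's value (2 for table ok2, 0 for table ok0)
def buildCell (m : List (List Int)) (dr dc r : Int)
    (t : PySem.Dict (Int × Int) Bool × PySem.Dict (Int × Int) Bool) (c : Int) :
    PySem.Dict (Int × Int) Bool × PySem.Dict (Int × Int) Bool :=
  let v := cellAt m r c
  let nxt := (r + dr, c + dc)
  let ok2 := t.1.insert (r, c) (v == 2 && t.2.getD nxt true)
  let ok0 := t.2.insert (r, c) (v == 0 && ok2.getD nxt true)
  (ok2, ok0)

def buildRow (m : List (List Int)) (cols dr dc : Int)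
    (t : PySem.Dict (Int × Int) Bool × PySem.Dict (Int × Int) Bool) (r : Int) :
    PySem.Dict (Int × Int) Bool × PySem.Dict (Int × Int) Bool :=
  (if dc = 1 then PySem.List.pyRange (cols - 1) (-1) (-1) else PySem.List.pyRange 0 cols 1).foldl
    (buildCell m dr dc r) t

-- border-inward sweep: rows are processed so that (r + dr, c + dc) is already filled
def buildTable (m : List (List Int)) (rows cols dr dc : Int) : PySem.Dict (Int × Int) Bool :=
  ((if dr = 1 then PySem.List.pyRange (rows - 1) (-1) (-1) else PySem.List.pyRange 0 rows 1).foldl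
    (buildRow m cols dr dc) (PySem.Dict.empty, PySem.Dict.empty)).1

def solution_alt (matrix : List (List Int)) : Int :=
  match matrix with
  | [] => 0
  | row0 :: _ =>
    let rows : Int := (matrix.length : Int)
    let cols : Int := (row0.length : Int)
    let tables := ([(1, 1), (1, -1), (-1, 1), (-1, -1)] : List (Int × Int)).map
      (fun d => (d.1, d.2, buildTable matrix rows cols d.1 d.2))
    (PySem.List.pyRange 0 rows 1).foldl (fun best r =>
      (PySem.List.pyRange 0 cols 1).foldl (fun best c =>
        if cellAt matrix r c ≠ 1 then best
        else tables.foldl (fun best td =>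
          if td.2.2.getD (r + td.1, c + td.2.1) true then
            let t := rayLen rows cols td.1 td.2.1 r c
            if t > best then t else best
          else best) best) best) 0

-- ===== PRECONDITION & SPEC =====
-- Pre_ excludes only ragged matrices with a row shorter than the first row: there Python A (and B) raises IndexError.
def Pre_solution (matrix : List (List Int)) : Prop :=
  ∀ row ∈ matrix, (matrix.headD []).length ≤ row.length
instance (matrix : List (List Int)) : Decidable (Pre_solution matrix) := by
  unfold Pre_solution; infer_instance

def pvWitness_solution : List (List Int) := [[1, 2], [2, 0]]

def Spec_solution (matrix : List (List Int)) (out : Int) : Prop := out = solution_alt matrix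
instance (matrix : List (List Int)) (out : Int) : Decidable (Spec_solution matrix out) := by unfold Spec_solution; infer_instance

-- ===== CLAIM (what is proved, stated in full; the proofs are below) =====
def Claim_equal_solution : Prop := ∀ (matrix : List (List Int)), Dom_solution matrix → Pre_solution matrix → Spec_solution matrix (solution matrix)

-- ===== LEMMAS AND PROOFS =====

-- "the ray from (r, c) to the border alternates start, 2-start, start, …"
def okSpec (m : List (List Int)) (rows cols dr dc start r c : Int) : Bool :=
  decide (∀ k : Nat, k < (rayLen rows cols dr dc r c).toNat →
    cellAt m (r + k * dr) (c + k * dc) = if k % 2 = 0 then start else 2 - start)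

-- invariant of B's sweep: the two dicts hold exactly the cells P, with the spec values
def TInv (m : List (List Int)) (rows cols dr dc : Int) (P : Int × Int → Bool)
    (t : PySem.Dict (Int × Int) Bool × PySem.Dict (Int × Int) Bool) : Prop :=
  (∀ p : Int × Int, t.1.get? p = if P p then some (okSpec m rows cols dr dc 2 p.1 p.2) else none) ∧
  (∀ p : Int × Int, t.2.get? p = if P p then some (okSpec m rows cols dr dc 0 p.1 p.2) else none)

lemma foldl_eq_nonneg {α : Type} (l : List α) (f g : Int → α → Int)
    (h : ∀ b, 0 ≤ b → ∀ a ∈ l, f b a = g b a ∧ 0 ≤ f b a) :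
    ∀ b, 0 ≤ b → l.foldl f b = l.foldl g b ∧ 0 ≤ l.foldl f b := by
  induction l with
  | nil => intro b hb; exact ⟨rfl, hb⟩
  | cons a l ih =>
    intro b hb
    obtain ⟨he, hn⟩ := h b hb a (List.mem_cons_self ..)
    have hrec := ih (fun b hb a ha => h b hb a (List.mem_cons_of_mem _ ha)) (f b a) hn
    simp only [List.foldl_cons]
    exact ⟨he ▸ hrec.1, hrec.2⟩

lemma walk_char (m : List (List Int)) (rows cols dr dc : Int) :
    ∀ (n fuel : Nat) (x y s len : Int), n ≤ fuel →
    (∀ k : Nat, k < n → 0 ≤ x + k * dr ∧ x + k * dr < rows ∧ 0 ≤ y + k * dc ∧ y + k * dc < cols) →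
    ¬(0 ≤ x + n * dr ∧ x + n * dr < rows ∧ 0 ≤ y + n * dc ∧ y + n * dc < cols) →
    walkA m rows cols dr dc fuel x y s len =
      if (∀ k : Nat, k < n → cellAt m (x + k * dr) (y + k * dc) = getPatternA (s + k)) then len + n
      else 0 := by
  intro n
  induction n with
  | zero =>
    intro fuel x y s len _ _ hout
    simp only [Nat.cast_zero, zero_mul, add_zero] at hout
    rw [if_pos (fun k hk => absurd hk (Nat.not_lt_zero k))]
    cases fuel with
    | zero => simp [walkA]
    | succ f => simp [walkA, hout]
  | succ n ih =>
    intro fuel x y s len hfuel hin hout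
    have hx : 0 ≤ x ∧ x < rows ∧ 0 ≤ y ∧ y < cols := by
      have := hin 0 (by omega); simpa using this
    obtain ⟨f, rfl⟩ : ∃ f, fuel = f + 1 := ⟨fuel - 1, by omega⟩
    rw [walkA, if_pos hx]
    by_cases hc : cellAt m x y = getPatternA s
    · rw [if_pos hc]
      have hshift : ∀ k : Nat, x + dr + k * dr = x + (k + 1 : Nat) * dr ∧
          y + dc + k * dc = y + (k + 1 : Nat) * dc := by
        intro k; constructor <;> (push_cast; ring)
      have key := ih f (x + dr) (y + dc) (s + 1) (len + 1) (by omega)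
        (fun k hk => by
          rw [(hshift k).1, (hshift k).2]; exact hin (k + 1) (by omega))
        (by rw [(hshift n).1, (hshift n).2]; exact hout)
      rw [key]
      by_cases hall : ∀ k : Nat, k < n + 1 → cellAt m (x + k * dr) (y + k * dc) = getPatternA (s + k)
      · rw [if_pos, if_pos hall]
        · push_cast; ring
        · intro k hk
          rw [(hshift k).1, (hshift k).2]
          have := hall (k + 1) (by omega)
          convert this using 2
          push_cast; ring
      · rw [if_neg, if_neg hall]
        intro hsh
        apply hall
        intro k hk
        match k with
        | 0 => simpa using hc
        | (j + 1) =>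
          have := hsh j (by omega)
          rw [(hshift j).1, (hshift j).2] at this
          convert this using 2
          push_cast; ring
    · rw [if_neg hc, if_neg]
      intro hall
      have := hall 0 (by omega)
      simp at this
      exact hc this

lemma ray_pos (rows cols dr dc r c : Int)
    (hr : 0 ≤ r ∧ r < rows) (_hc : 0 ≤ c ∧ c < cols) :
    1 ≤ rayLen rows cols dr dc r c := by
  unfold rayLen; split_ifs <;> omega

lemma ray_le (rows cols dr dc r c : Int)
    (hr : 0 ≤ r ∧ r < rows) (_hc : 0 ≤ c ∧ c < cols) :
    rayLen rows cols dr dc r c ≤ rows := by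
  unfold rayLen; split_ifs <;> omega

lemma ray_in (rows cols dr dc r c : Int)
    (hdr : dr = 1 ∨ dr = -1) (hdc : dc = 1 ∨ dc = -1)
    (hr : 0 ≤ r ∧ r < rows) (hc : 0 ≤ c ∧ c < cols)
    (k : Nat) (hk : (k : Int) < rayLen rows cols dr dc r c) :
    0 ≤ r + k * dr ∧ r + k * dr < rows ∧ 0 ≤ c + k * dc ∧ c + k * dc < cols := by
  unfold rayLen at hk
  rcases hdr with h1 | h1 <;> rcases hdc with h2 | h2 <;> subst h1 <;> subst h2 <;>
    norm_num at hk ⊢ <;> omega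

lemma ray_out (rows cols dr dc r c : Int)
    (hdr : dr = 1 ∨ dr = -1) (hdc : dc = 1 ∨ dc = -1)
    (hr : 0 ≤ r ∧ r < rows) (_hc : 0 ≤ c ∧ c < cols) :
    ¬(0 ≤ r + ((rayLen rows cols dr dc r c).toNat : Int) * dr ∧
      r + ((rayLen rows cols dr dc r c).toNat : Int) * dr < rows ∧
      0 ≤ c + ((rayLen rows cols dr dc r c).toNat : Int) * dc ∧
      c + ((rayLen rows cols dr dc r c).toNat : Int) * dc < cols) := by
  unfold rayLen
  rcases hdr with h1 | h1 <;> rcases hdc with h2 | h2 <;> subst h1 <;> subst h2 <;>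
    norm_num <;> omega

lemma ray_eq_one (rows cols dr dc r c : Int)
    (hdr : dr = 1 ∨ dr = -1) (hdc : dc = 1 ∨ dc = -1)
    (hr : 0 ≤ r ∧ r < rows) (hc : 0 ≤ c ∧ c < cols)
    (hn : ¬(0 ≤ r + dr ∧ r + dr < rows ∧ 0 ≤ c + dc ∧ c + dc < cols)) :
    rayLen rows cols dr dc r c = 1 := by
  unfold rayLen
  rcases hdr with h1 | h1 <;> rcases hdc with h2 | h2 <;> subst h1 <;> subst h2 <;>
    simp_all <;> omega

lemma ray_eq_succ (rows cols dr dc r c : Int)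
    (hdr : dr = 1 ∨ dr = -1) (hdc : dc = 1 ∨ dc = -1)
    (hn : 0 ≤ r + dr ∧ r + dr < rows ∧ 0 ≤ c + dc ∧ c + dc < cols) :
    rayLen rows cols dr dc r c = rayLen rows cols dr dc (r + dr) (c + dc) + 1 := by
  unfold rayLen
  rcases hdr with h1 | h1 <;> rcases hdc with h2 | h2 <;> subst h1 <;> subst h2 <;>
    simp_all <;> omega

lemma okSpec_rec (m : List (List Int)) (rows cols dr dc start r c : Int)
    (hdr : dr = 1 ∨ dr = -1) (hdc : dc = 1 ∨ dc = -1)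
    (hr : 0 ≤ r ∧ r < rows) (hc : 0 ≤ c ∧ c < cols) :
    okSpec m rows cols dr dc start r c =
      ((cellAt m r c == start) &&
        (if 0 ≤ r + dr ∧ r + dr < rows ∧ 0 ≤ c + dc ∧ c + dc < cols
         then okSpec m rows cols dr dc (2 - start) (r + dr) (c + dc) else true)) := by
  rw [Bool.eq_iff_iff]
  simp only [okSpec, decide_eq_true_eq, Bool.and_eq_true, beq_iff_eq]
  by_cases hn : 0 ≤ r + dr ∧ r + dr < rows ∧ 0 ≤ c + dc ∧ c + dc < cols
  · rw [if_pos hn]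
    have hsucc := ray_eq_succ rows cols dr dc r c hdr hdc hn
    have hnpos := ray_pos rows cols dr dc (r + dr) (c + dc) ⟨hn.1, hn.2.1⟩ ⟨hn.2.2.1, hn.2.2.2⟩
    simp only [decide_eq_true_eq]
    have e1 : ∀ j : Nat, r + dr + (j : Int) * dr = r + ((j + 1 : Nat) : Int) * dr := by
      intro j; push_cast; ring
    have e2 : ∀ j : Nat, c + dc + (j : Int) * dc = c + ((j + 1 : Nat) : Int) * dc := by
      intro j; push_cast; ring
    constructor
    · intro h
      refine ⟨by simpa using h 0 (by omega), fun j hj => ?_⟩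
      rw [e1 j, e2 j, h (j + 1) (by omega)]
      by_cases hp : j % 2 = 0
      · rw [if_pos hp, if_neg (by omega)]
      · rw [if_neg hp, if_pos (by omega)]
        ring
    · rintro ⟨h0, hrec⟩ k hk
      match k with
      | 0 => simpa using h0
      | (j + 1) =>
        rw [← e1 j, ← e2 j, hrec j (by omega)]
        by_cases hp : j % 2 = 0
        · rw [if_pos hp, if_neg (by omega)]
        · rw [if_neg hp, if_pos (by omega)]
          ring
  · rw [if_neg hn]
    have h1 := ray_eq_one rows cols dr dc r c hdr hdc hr hc hn
    rw [h1]
    constructor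
    · intro h
      exact ⟨by simpa using h 0 (by omega), rfl⟩
    · rintro ⟨h0, -⟩ k hk
      have hk0 : k = 0 := by omega
      subst hk0
      simpa using h0

-- A's pattern condition, at a 1-cell, is exactly "next cell out of bounds or ok2 there"
lemma pattern_iff (m : List (List Int)) (rows cols dr dc r c : Int)
    (hdr : dr = 1 ∨ dr = -1) (hdc : dc = 1 ∨ dc = -1)
    (hr : 0 ≤ r ∧ r < rows) (hc : 0 ≤ c ∧ c < cols) (h1 : cellAt m r c = 1) :
    ((∀ k : Nat, k < (rayLen rows cols dr dc r c).toNat →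
        cellAt m (r + k * dr) (c + k * dc) = getPatternA k) ↔
      ((0 ≤ r + dr ∧ r + dr < rows ∧ 0 ≤ c + dc ∧ c + dc < cols) →
        okSpec m rows cols dr dc 2 (r + dr) (c + dc) = true)) := by
  have hg : ∀ j : Nat, getPatternA (((j + 1 : Nat) : Int)) = if j % 2 = 0 then (2 : Int) else 0 := by
    intro j
    unfold getPatternA
    rw [if_neg (by push_cast; omega), PySem.Int.mod_eq_emod_of_pos (by omega)]
    by_cases hp : j % 2 = 0
    · rw [if_pos (by push_cast; omega), if_pos hp]
    · rw [if_neg (by push_cast; omega), if_neg hp]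
  constructor
  · intro h hn
    have hsucc := ray_eq_succ rows cols dr dc r c hdr hdc hn
    have hnpos := ray_pos rows cols dr dc (r + dr) (c + dc) ⟨hn.1, hn.2.1⟩ ⟨hn.2.2.1, hn.2.2.2⟩
    simp only [okSpec, decide_eq_true_eq]
    intro j hj
    have e1 : r + dr + (j : Int) * dr = r + ((j + 1 : Nat) : Int) * dr := by push_cast; ring
    have e2 : c + dc + (j : Int) * dc = c + ((j + 1 : Nat) : Int) * dc := by push_cast; ring
    rw [e1, e2, h (j + 1) (by omega), hg j]
    norm_num
  · intro hok k hk
    match k with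
    | 0 => simpa [getPatternA] using h1
    | (j + 1) =>
      by_cases hn : 0 ≤ r + dr ∧ r + dr < rows ∧ 0 ≤ c + dc ∧ c + dc < cols
      · have hsucc := ray_eq_succ rows cols dr dc r c hdr hdc hn
        have hx := hok hn
        simp only [okSpec, decide_eq_true_eq] at hx
        have e1 : r + dr + (j : Int) * dr = r + ((j + 1 : Nat) : Int) * dr := by push_cast; ring
        have e2 : c + dc + (j : Int) * dc = c + ((j + 1 : Nat) : Int) * dc := by push_cast; ring
        have hnpos := ray_pos rows cols dr dc (r + dr) (c + dc) ⟨hn.1, hn.2.1⟩ ⟨hn.2.2.1, hn.2.2.2⟩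
        rw [← e1, ← e2, hx j (by omega), hg j]
        norm_num
      · rw [ray_eq_one rows cols dr dc r c hdr hdc hr hc hn] at hk
        omega

lemma TInv_congr (m : List (List Int)) (rows cols dr dc : Int) (P Q : Int × Int → Bool)
    (h : ∀ p, P p = Q p)
    (t : PySem.Dict (Int × Int) Bool × PySem.Dict (Int × Int) Bool)
    (ht : TInv m rows cols dr dc P t) : TInv m rows cols dr dc Q t :=
  ⟨fun p => (h p) ▸ ht.1 p, fun p => (h p) ▸ ht.2 p⟩

lemma buildCell_inv (m : List (List Int)) (rows cols dr dc r c : Int)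
    (hdr : dr = 1 ∨ dr = -1) (hdc : dc = 1 ∨ dc = -1)
    (hr : 0 ≤ r ∧ r < rows) (hc : 0 ≤ c ∧ c < cols)
    (P : Int × Int → Bool)
    (Pb : ∀ p, P p = true → 0 ≤ p.1 ∧ p.1 < rows ∧ 0 ≤ p.2 ∧ p.2 < cols)
    (Pn : ∀ y : Int, 0 ≤ r + dr → r + dr < rows → 0 ≤ y → y < cols → P (r + dr, y) = true)
    (t : PySem.Dict (Int × Int) Bool × PySem.Dict (Int × Int) Bool)
    (ht : TInv m rows cols dr dc P t) :
    TInv m rows cols dr dc (fun p => P p || decide (p = (r, c))) (buildCell m dr dc r t c) := by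
  obtain ⟨ht2, ht0⟩ := ht
  have hdr0 : dr ≠ 0 := by rcases hdr with h | h <;> simp [h]
  have hne : ((r + dr, c + dc) : Int × Int) ≠ (r, c) := by
    intro he
    have := congrArg Prod.fst he
    simp at this
    omega
  have hread : ∀ (d : PySem.Dict (Int × Int) Bool) (start : Int),
      (∀ p : Int × Int, d.get? p = if P p then some (okSpec m rows cols dr dc start p.1 p.2) else none) →
      d.getD (r + dr, c + dc) true =
        (if 0 ≤ r + dr ∧ r + dr < rows ∧ 0 ≤ c + dc ∧ c + dc < cols
         then okSpec m rows cols dr dc start (r + dr) (c + dc) else true) := by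
    intro d start hd
    rw [PySem.Dict.getD_eq_get?_getD, hd]
    by_cases hb : 0 ≤ r + dr ∧ r + dr < rows ∧ 0 ≤ c + dc ∧ c + dc < cols
    · rw [if_pos hb, if_pos (Pn (c + dc) hb.1 hb.2.1 hb.2.2.1 hb.2.2.2)]
      rfl
    · rw [if_neg hb]
      cases hPv : P (r + dr, c + dc) with
      | false => simp
      | true => exact absurd (Pb _ hPv) hb
  have hv2 : (cellAt m r c == 2 && t.2.getD (r + dr, c + dc) true) =
      okSpec m rows cols dr dc 2 r c := by
    rw [hread t.2 0 ht0, okSpec_rec m rows cols dr dc 2 r c hdr hdc hr hc]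
    norm_num
  have hv0 : (cellAt m r c == 0 &&
        (t.1.insert (r, c) (cellAt m r c == 2 && t.2.getD (r + dr, c + dc) true)).getD
          (r + dr, c + dc) true) = okSpec m rows cols dr dc 0 r c := by
    rw [PySem.Dict.getD_insert_of_ne _ _ _ hne, hread t.1 2 ht2,
      okSpec_rec m rows cols dr dc 0 r c hdr hdc hr hc]
    norm_num
  simp only [buildCell]
  constructor
  · intro p
    rw [PySem.Dict.get?_insert]
    by_cases hp : p = (r, c)
    · subst hp
      rw [if_pos rfl, hv2]
      simp
    · rw [if_neg hp, ht2 p]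
      simp [hp]
  · intro p
    rw [PySem.Dict.get?_insert]
    by_cases hp : p = (r, c)
    · subst hp
      rw [if_pos rfl, hv0]
      simp
    · rw [if_neg hp, ht0 p]
      simp [hp]

lemma fold_row (m : List (List Int)) (rows cols dr dc r : Int)
    (hdr : dr = 1 ∨ dr = -1) (hdc : dc = 1 ∨ dc = -1) (hr : 0 ≤ r ∧ r < rows) :
    ∀ (cs : List Int), (∀ c ∈ cs, 0 ≤ c ∧ c < cols) →
    ∀ (P : Int × Int → Bool),
      (∀ p, P p = true → 0 ≤ p.1 ∧ p.1 < rows ∧ 0 ≤ p.2 ∧ p.2 < cols) →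
      (∀ y : Int, 0 ≤ r + dr → r + dr < rows → 0 ≤ y → y < cols → P (r + dr, y) = true) →
      ∀ (t : PySem.Dict (Int × Int) Bool × PySem.Dict (Int × Int) Bool),
      TInv m rows cols dr dc P t →
      TInv m rows cols dr dc (fun p => P p || (decide (p.1 = r) && cs.contains p.2))
        (cs.foldl (buildCell m dr dc r) t) := by
  intro cs
  induction cs with
  | nil =>
    intro _ P Pb Pn t ht
    exact TInv_congr m rows cols dr dc P _ (fun p => by simp) t ht
  | cons c cs ih =>
    intro hcs P Pb Pn t ht
    have hc : 0 ≤ c ∧ c < cols := hcs c (by simp)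
    simp only [List.foldl_cons]
    have step := buildCell_inv m rows cols dr dc r c hdr hdc hr hc P Pb Pn t ht
    have hrest := ih (fun c' hc' => hcs c' (by simp [hc']))
      (fun p => P p || decide (p = (r, c)))
      (fun p hp => by
        simp only [Bool.or_eq_true, decide_eq_true_eq] at hp
        rcases hp with hp | hp
        · exact Pb p hp
        · subst hp; exact ⟨hr.1, hr.2, hc.1, hc.2⟩)
      (fun y h1 h2 h3 h4 => by simp [Pn y h1 h2 h3 h4])
      _ step
    refine TInv_congr m rows cols dr dc _ _ (fun p => ?_) _ hrest
    rw [Bool.eq_iff_iff]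
    simp only [Bool.or_eq_true, Bool.and_eq_true, decide_eq_true_eq, List.contains_cons,
      beq_iff_eq, Prod.ext_iff]
    constructor
    · rintro ((h | ⟨h1, h2⟩) | ⟨h1, h2⟩)
      · exact Or.inl h
      · exact Or.inr ⟨h1, Or.inl h2⟩
      · exact Or.inr ⟨h1, Or.inr h2⟩
    · rintro (h | ⟨h1, h2 | h2⟩)
      · exact Or.inl (Or.inl h)
      · exact Or.inl (Or.inr ⟨h1, h2⟩)
      · exact Or.inr ⟨h1, h2⟩

lemma build_correct (m : List (List Int)) (rows cols dr dc : Int)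
    (hdr : dr = 1 ∨ dr = -1) (hdc : dc = 1 ∨ dc = -1) (hrows : 0 < rows) :
    ∀ p : Int × Int, (buildTable m rows cols dr dc).get? p =
      if 0 ≤ p.1 ∧ p.1 < rows ∧ 0 ≤ p.2 ∧ p.2 < cols
      then some (okSpec m rows cols dr dc 2 p.1 p.2) else none := by
  have hcs : ∀ c ∈ (if dc = 1 then PySem.List.pyRange (cols - 1) (-1) (-1)
      else PySem.List.pyRange 0 cols 1), 0 ≤ c ∧ c < cols := by
    rcases hdc with h | h <;> subst h <;> intro c hcm <;> norm_num at hcm <;> omega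
  have hcontains : ∀ y : Int, ((if dc = 1 then PySem.List.pyRange (cols - 1) (-1) (-1)
      else PySem.List.pyRange 0 cols 1).contains y = true) ↔ (0 ≤ y ∧ y < cols) := by
    intro y
    rw [List.contains_iff_mem]
    rcases hdc with h | h <;> subst h <;> norm_num <;> omega
  have hrow : ∀ (a : Int) (t : PySem.Dict (Int × Int) Bool × PySem.Dict (Int × Int) Bool),
      0 ≤ a → a < rows →
      TInv m rows cols dr dc
        (fun p => decide (a * dr < p.1 * dr ∧ 0 ≤ p.1 ∧ p.1 < rows ∧ 0 ≤ p.2 ∧ p.2 < cols)) t →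
      TInv m rows cols dr dc
        (fun p => decide (a * dr ≤ p.1 * dr ∧ 0 ≤ p.1 ∧ p.1 < rows ∧ 0 ≤ p.2 ∧ p.2 < cols))
        (buildRow m cols dr dc t a) := by
    intro a t ha0 har ht
    unfold buildRow
    have step := fold_row m rows cols dr dc a hdr hdc ⟨ha0, har⟩ _ hcs _
      (fun p hp => by simp only [decide_eq_true_eq] at hp; exact ⟨hp.2.1, hp.2.2.1, hp.2.2.2⟩)
      (fun y h1 h2 h3 h4 => by
        simp only [decide_eq_true_eq]
        refine ⟨?_, h1, h2, h3, h4⟩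
        rcases hdr with h | h <;> subst h <;> simp only [mul_one, mul_neg_one] <;> omega)
      t ht
    refine TInv_congr m rows cols dr dc _ _ (fun p => ?_) _ step
    rw [Bool.eq_iff_iff]
    simp only [Bool.or_eq_true, Bool.and_eq_true, decide_eq_true_eq, hcontains p.2]
    rcases hdr with h | h <;> subst h <;> simp only [mul_one, mul_neg_one] <;>
      constructor
    · rintro (⟨h1, h2⟩ | ⟨h1, h2⟩)
      · exact ⟨by omega, h2⟩
      · exact ⟨by omega, by omega, by omega, h2⟩
    · rintro ⟨h1, h2⟩
      by_cases he : p.1 = a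
      · exact Or.inr ⟨he, h2.2.2⟩
      · exact Or.inl ⟨by omega, h2⟩
    · rintro (⟨h1, h2⟩ | ⟨h1, h2⟩)
      · exact ⟨by omega, h2⟩
      · exact ⟨by omega, by omega, by omega, h2⟩
    · rintro ⟨h1, h2⟩
      by_cases he : p.1 = a
      · exact Or.inr ⟨he, h2.2.2⟩
      · exact Or.inl ⟨by omega, h2⟩
  intro p
  rcases hdr with h | h <;> subst h
  · have hdesc : ∀ (n : Nat) (a : Int), a + 1 = (n : Int) → a < rows →
        ∀ t, TInv m rows cols 1 dc
          (fun p => decide (a * 1 < p.1 * 1 ∧ 0 ≤ p.1 ∧ p.1 < rows ∧ 0 ≤ p.2 ∧ p.2 < cols)) t →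
        TInv m rows cols 1 dc
          (fun p => decide (0 ≤ p.1 ∧ p.1 < rows ∧ 0 ≤ p.2 ∧ p.2 < cols))
          ((PySem.List.pyRange a (-1) (-1)).foldl (buildRow m cols 1 dc) t) := by
      intro n
      induction n with
      | zero =>
        intro a ha _ t ht
        rw [PySem.List.pyRange_neg_one_eq_nil (by omega)]
        exact TInv_congr m rows cols 1 dc _ _
          (fun p => decide_eq_decide.mpr
            ⟨fun hp => hp.2, fun hp => ⟨by omega, hp⟩⟩) t ht
      | succ n ih =>
        intro a ha har t ht
        rw [PySem.List.pyRange_neg_one_cons (by omega : (-1 : Int) < a), List.foldl_cons]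
        have step := hrow a t (by omega) har ht
        refine ih (a - 1) (by omega) (by omega) _
          (TInv_congr m rows cols 1 dc _ _
            (fun p => decide_eq_decide.mpr (by constructor <;> intro hp <;>
              exact ⟨by omega, hp.2⟩)) _ step)
    have hinit : TInv m rows cols 1 dc
        (fun p => decide ((rows - 1) * 1 < p.1 * 1 ∧ 0 ≤ p.1 ∧ p.1 < rows ∧ 0 ≤ p.2 ∧ p.2 < cols))
        (PySem.Dict.empty, PySem.Dict.empty) := by
      constructor <;> intro p <;> rw [PySem.Dict.get?_empty, if_neg] <;>
        simp only [decide_eq_true_eq, not_and] <;> intro h1 h2 <;> omega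
    have final := hdesc rows.toNat (rows - 1) (by omega) (by omega)
      (PySem.Dict.empty, PySem.Dict.empty) hinit
    unfold buildTable
    rw [if_pos rfl]
    have := final.1 p
    simpa using this
  · have hasc : ∀ (n : Nat) (a : Int), rows - a = (n : Int) → 0 ≤ a →
        ∀ t, TInv m rows cols (-1) dc
          (fun p => decide (a * (-1) < p.1 * (-1) ∧ 0 ≤ p.1 ∧ p.1 < rows ∧ 0 ≤ p.2 ∧ p.2 < cols)) t →
        TInv m rows cols (-1) dc
          (fun p => decide (0 ≤ p.1 ∧ p.1 < rows ∧ 0 ≤ p.2 ∧ p.2 < cols))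
          ((PySem.List.pyRange a rows 1).foldl (buildRow m cols (-1) dc) t) := by
      intro n
      induction n with
      | zero =>
        intro a ha ha0 t ht
        have he : a = rows := by omega
        rw [PySem.List.pyRange_one_eq_nil (by omega)]
        exact TInv_congr m rows cols (-1) dc _ _
          (fun p => decide_eq_decide.mpr
            ⟨fun hp => hp.2, fun hp => ⟨by omega, hp⟩⟩) t ht
      | succ n ih =>
        intro a ha ha0 t ht
        rw [PySem.List.pyRange_one_cons (by omega : a < rows), List.foldl_cons]
        have step := hrow a t ha0 (by omega) ht
        refine ih (a + 1) (by omega) (by omega) _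
          (TInv_congr m rows cols (-1) dc _ _
            (fun p => decide_eq_decide.mpr (by constructor <;> intro hp <;>
              exact ⟨by omega, hp.2⟩)) _ step)
    have hinit : TInv m rows cols (-1) dc
        (fun p => decide (0 * (-1) < p.1 * (-1) ∧ 0 ≤ p.1 ∧ p.1 < rows ∧ 0 ≤ p.2 ∧ p.2 < cols))
        (PySem.Dict.empty, PySem.Dict.empty) := by
      constructor <;> intro p <;> rw [PySem.Dict.get?_empty, if_neg] <;>
        simp only [decide_eq_true_eq, not_and] <;> intro h1 h2 <;> omega
    have final := hasc rows.toNat 0 (by omega) (by omega)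
      (PySem.Dict.empty, PySem.Dict.empty) hinit
    unfold buildTable
    rw [if_neg (by norm_num)]
    have := final.1 p
    simpa using this

lemma dir_update (m : List (List Int)) (rows cols r c dr dc : Int)
    (hdr : dr = 1 ∨ dr = -1) (hdc : dc = 1 ∨ dc = -1) (hrows : 0 < rows)
    (hr : 0 ≤ r ∧ r < rows) (hcc : 0 ≤ c ∧ c < cols) (h1 : cellAt m r c = 1)
    (b : Int) (hb : 0 ≤ b) :
    max b (checkDiagonal m rows cols r c dr dc) =
      (if (buildTable m rows cols dr dc).getD (r + dr, c + dc) true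
       then (if rayLen rows cols dr dc r c > b then rayLen rows cols dr dc r c else b)
       else b) := by
  have hpos := ray_pos rows cols dr dc r c hr hcc
  have hle := ray_le rows cols dr dc r c hr hcc
  have hchar : checkDiagonal m rows cols r c dr dc =
      if (∀ k : Nat, k < (rayLen rows cols dr dc r c).toNat →
            cellAt m (r + k * dr) (c + k * dc) = getPatternA k)
      then rayLen rows cols dr dc r c else 0 := by
    unfold checkDiagonal
    rw [walk_char m rows cols dr dc (rayLen rows cols dr dc r c).toNat _ r c 0 0 (by omega)
        (fun k hk => ray_in rows cols dr dc r c hdr hdc hr hcc k (by omega))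
        (ray_out rows cols dr dc r c hdr hdc hr hcc)]
    simp only [zero_add]
    split_ifs <;> omega
  rw [hchar, PySem.Dict.getD_eq_get?_getD,
    build_correct m rows cols dr dc hdr hdc hrows (r + dr, c + dc)]
  have hiff := pattern_iff m rows cols dr dc r c hdr hdc hr hcc h1
  by_cases hnb : 0 ≤ r + dr ∧ r + dr < rows ∧ 0 ≤ c + dc ∧ c + dc < cols
  · rw [if_pos hnb, Option.getD_some]
    by_cases hok : okSpec m rows cols dr dc 2 (r + dr) (c + dc) = true
    · rw [if_pos (hiff.mpr (fun _ => hok)), if_pos hok]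
      rw [max_def]
      split_ifs <;> omega
    · rw [if_neg (fun hc' => hok (hiff.mp hc' hnb)), if_neg hok]
      exact max_eq_left hb
  · rw [if_neg hnb, Option.getD_none,
      if_pos (hiff.mpr (fun h => absurd h hnb)), if_pos rfl]
    rw [max_def]
    split_ifs <;> omega

lemma main_eq (matrix : List (List Int)) : solution matrix = solution_alt matrix := by
  cases matrix with
  | nil => rfl
  | cons row0 rest =>
    unfold solution solution_alt
    set m := row0 :: rest with hm
    have hrows : 0 < (m.length : Int) := by simp [hm]
    simp only [List.foldl_map]
    refine (foldl_eq_nonneg _ _ _ (fun b hb r hrmem => ?_) 0 le_rfl).1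
    rw [PySem.List.mem_pyRange_one] at hrmem
    refine foldl_eq_nonneg _ _ _ (fun b hb cc hcmem => ?_) b hb
    rw [PySem.List.mem_pyRange_one] at hcmem
    by_cases hone : cellAt m r cc = 1
    · rw [if_pos hone, if_neg (by simp [hone])]
      simp only [directionsA]
      refine foldl_eq_nonneg _ _ _ (fun b hb dir hdir => ?_) b hb
      have hd : (dir.1 = 1 ∨ dir.1 = -1) ∧ (dir.2 = 1 ∨ dir.2 = -1) := by
        simp only [List.mem_cons, List.not_mem_nil, or_false] at hdir
        rcases hdir with h | h | h | h <;> subst h <;> simp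
      have hupd := dir_update m (m.length) (row0.length) r cc dir.1 dir.2 hd.1 hd.2 hrows
        ⟨hrmem.1, hrmem.2⟩ ⟨hcmem.1, hcmem.2⟩ hone b hb
      exact ⟨hupd, le_trans hb (le_max_left _ _)⟩
    · rw [if_neg hone, if_pos (by simp [hone])]
      exact ⟨rfl, hb⟩

-- ===== VERDICT (by name: the statement is the Claim_ definition above) =====
theorem solution_spec : Claim_equal_solution := by
  intro matrix _ _
  unfold Spec_solution
  exact main_eq matrix
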